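-- pv_equiv track=rewrite | github.com/netmode/FedXAI4DNS | dataset_processing/feature_extractor.py | find_maximum_gap_between_dots
-- ===== SOURCE A (Python) =====
-- def find_maximum_gap_between_dots(name):
--     ''' Determines the maximum number of characters contained between two
--         subsequent dot delimiters
--     '''
--
--     labels = name.split('.')
--
--     if len(labels) <= 2:
--         max_length = 0
--     else:
--         lengths = [len(label) for label in labels[1:-1]]
--         max_length = max(lengths)
--
--     return max_length
-- ===== SOURCE B (Python) =====
-- def find_maximum_gap_between_dots(name):
--     ''' Maximum number of characters between two subsequent dot delimiters,
--         computed in one pass over the characters (no split, no label list). '''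
--     max_length = 0
--     prev = -1
--     dots = 0
--     for i, ch in enumerate(name):
--         if ch == '.':
--             if dots > 0:
--                 gap = i - prev - 1
--                 if gap > max_length:
--                     max_length = gap
--             prev = i
--             dots += 1
--     return max_length if dots >= 2 else 0
-- ===== Notes on version B (the rewrite author's own statement) =====
-- stated objective: alternative
-- what changed: Replaces split('.') plus a list of middle-label lengths and max() by a single character scan that tracks the previous dot's index and a dot count, updating a running maximum gap at each dot.
import Mathlib
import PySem

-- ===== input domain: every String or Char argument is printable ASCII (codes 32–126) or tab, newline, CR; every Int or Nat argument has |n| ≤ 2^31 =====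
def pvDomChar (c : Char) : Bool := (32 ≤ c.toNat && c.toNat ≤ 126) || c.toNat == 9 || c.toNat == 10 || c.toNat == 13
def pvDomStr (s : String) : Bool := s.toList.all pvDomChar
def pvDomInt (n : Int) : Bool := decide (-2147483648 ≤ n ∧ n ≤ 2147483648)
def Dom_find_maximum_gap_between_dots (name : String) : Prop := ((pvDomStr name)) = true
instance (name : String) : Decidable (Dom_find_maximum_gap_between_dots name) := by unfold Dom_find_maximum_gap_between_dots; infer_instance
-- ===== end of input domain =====

-- B replaces split('.') + max over the middle-label lengths by a single character scan that
-- tracks the previous dot's index and a dot count (objective: alternative decomposition, same O(n)).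

-- ===== PORT A =====
def find_maximum_gap_between_dots (name : String) : Int :=
  let labels := PySem.Chars.splitOn name.toList ['.']
  if PySem.List.len labels ≤ 2 then 0
  else
    let lengths := (PySem.List.slice labels (some 1) (some (-1))).map (fun l => PySem.Chars.len l)
    -- max(lengths): lengths is provably nonempty in this branch, so the .getD 0 default is never used
    (PySem.List.max? lengths (fun x => x)).getD 0

-- ===== PORT B =====
-- state (max_length, prev, dots), one step per enumerated character (Source B's loop body)
def pvAltStep (st : Int × Int × Int) (p : Int × Char) : Int × Int × Int :=
  match st, p with
  | (m, prev, d), (i, ch) =>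
    if ch = '.' then
      let m' := if d > 0 then (if i - prev - 1 > m then i - prev - 1 else m) else m
      (m', i, d + 1)
    else (m, prev, d)

def find_maximum_gap_between_dots_alt (name : String) : Int :=
  let r := (PySem.List.enumerate name.toList 0).foldl pvAltStep (0, -1, 0)
  if r.2.2 ≥ 2 then r.1 else 0

-- ===== PRECONDITION & SPEC =====
def Spec_find_maximum_gap_between_dots (name : String) (out : Int) : Prop := out = find_maximum_gap_between_dots_alt name
instance (name : String) (out : Int) : Decidable (Spec_find_maximum_gap_between_dots name out) := by unfold Spec_find_maximum_gap_between_dots; infer_instance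

-- ===== CLAIM (what is proved, stated in full; the proofs are below) =====
def Claim_equal_find_maximum_gap_between_dots : Prop := ∀ (name : String), Dom_find_maximum_gap_between_dots name → Spec_find_maximum_gap_between_dots name (find_maximum_gap_between_dots name)

-- ===== LEMMAS AND PROOFS =====

-- structural version of split('.') on the character list (proof helper)
def pvSp : List Char → List (List Char)
  | [] => [[]]
  | c :: t =>
    if c = '.' then [] :: pvSp t
    else
      match pvSp t with
      | [] => [[]]
      | l :: ls => (c :: l) :: ls

def pvDots : List Char → Nat
  | [] => 0
  | c :: t => (if c = '.' then 1 else 0) + pvDots t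

def pvAddFirst (k : Int) : List Int → List Int
  | [] => []
  | x :: xs => (k + x) :: xs

theorem pvSp_ne_nil (cs : List Char) : pvSp cs ≠ [] := by
  cases cs with
  | nil => simp [pvSp]
  | cons c t =>
    simp only [pvSp]
    split_ifs
    · simp
    · cases h : pvSp t <;> simp

theorem pvSp_length (cs : List Char) : (pvSp cs).length = pvDots cs + 1 := by
  induction cs with
  | nil => simp [pvSp, pvDots]
  | cons c t ih =>
    simp only [pvSp, pvDots]
    split_ifs with h
    · simp; omega
    · cases h' : pvSp t with
      | nil => exact absurd h' (pvSp_ne_nil t)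
      | cons l ls => rw [h'] at ih; simp at ih ⊢; omega

theorem pvAddFirst_zero (xs : List Int) : pvAddFirst 0 xs = xs := by
  cases xs <;> simp [pvAddFirst]

theorem pv_go_eq (fuel : Nat) (cs cur : List Char) (acc : List (List Char))
    (h : cs.length < fuel) :
    PySem.Chars.splitOn.go ['.'] fuel cs cur acc =
      acc.reverse ++ (match pvSp cs with
        | [] => []
        | l :: ls => (cur.reverse ++ l) :: ls) := by
  induction fuel generalizing cs cur acc with
  | zero => omega
  | succ f ih =>
    cases cs with
    | nil =>
      simp [PySem.Chars.splitOn.go, pvSp]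
    | cons c rest =>
      by_cases hc : c = '.'
      · subst hc
        have hpre : List.isPrefixOf ['.'] ('.' :: rest) = true := by
          simp [List.isPrefixOf]
        rw [PySem.Chars.splitOn.go]
        simp only [hpre, if_pos, List.length_cons, List.length_nil, List.drop_succ_cons, List.drop_zero]
        rw [ih rest [] ((List.reverse cur) :: acc) (by simpa using Nat.lt_of_succ_lt_succ h)]
        obtain ⟨l, ls, hsp⟩ : ∃ l ls, pvSp rest = l :: ls := by
          cases hx : pvSp rest with
          | nil => exact absurd hx (pvSp_ne_nil rest)
          | cons a b => exact ⟨a, b, rfl⟩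
        simp [pvSp, hsp]
      · have hpre : List.isPrefixOf ['.'] (c :: rest) = false := by
          simp [List.isPrefixOf]
          exact fun hh => absurd hh.symm hc
        rw [PySem.Chars.splitOn.go]
        simp only [hpre, Bool.false_eq_true, if_false]
        rw [ih rest (c :: cur) acc (by simpa using Nat.lt_of_succ_lt_succ h)]
        obtain ⟨l, ls, hsp⟩ : ∃ l ls, pvSp rest = l :: ls := by
          cases hx : pvSp rest with
          | nil => exact absurd hx (pvSp_ne_nil rest)
          | cons a b => exact ⟨a, b, rfl⟩
        simp [pvSp, hsp, hc]

theorem pv_splitOn_eq (cs : List Char) :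
    PySem.Chars.splitOn cs ['.'] = pvSp cs := by
  unfold PySem.Chars.splitOn
  rw [pv_go_eq (cs.length + 1) cs [] [] (by omega)]
  obtain ⟨l, ls, hsp⟩ : ∃ l ls, pvSp cs = l :: ls := by
    cases hx : pvSp cs with
    | nil => exact absurd hx (pvSp_ne_nil cs)
    | cons a b => exact ⟨a, b, rfl⟩
  simp [hsp]

theorem pv_fold_pos (cs : List Char) :
    ∀ (i prev m d : Int), 1 ≤ d →
    ∃ p', (PySem.List.enumerate cs i).foldl pvAltStep (m, prev, d) =
      (List.foldl max m (pvAddFirst (i - prev - 1)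
          (((pvSp cs).map (fun l => (l.length : Int))).dropLast)),
       p', d + (pvDots cs : Int)) := by
  induction cs with
  | nil =>
    intro i prev m d hd
    exact ⟨prev, by simp [PySem.List.enumerate, pvSp, pvAddFirst, pvDots]⟩
  | cons c t ih =>
    intro i prev m d hd
    rw [PySem.List.enumerate_cons, List.foldl_cons]
    obtain ⟨l, ls, hsp⟩ : ∃ l ls, pvSp t = l :: ls := by
      cases hx : pvSp t with
      | nil => exact absurd hx (pvSp_ne_nil t)
      | cons a b => exact ⟨a, b, rfl⟩
    by_cases hc : c = '.'
    · subst hc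
      have hmax : (if d > 0 then (if i - prev - 1 > m then i - prev - 1 else m) else m)
          = max m (i - prev - 1) := by
        rw [max_def]; split_ifs <;> omega
      have hstep : pvAltStep (m, prev, d) (i, '.') = (max m (i - prev - 1), i, d + 1) := by
        rw [show pvAltStep (m, prev, d) (i, '.')
            = (if d > 0 then (if i - prev - 1 > m then i - prev - 1 else m) else m, i, d + 1)
          from rfl, hmax]
      rw [hstep]
      obtain ⟨p', hp⟩ := ih (i + 1) i (max m (i - prev - 1)) (d + 1) (by omega)
      refine ⟨p', ?_⟩
      rw [hp]
      have harg : i + 1 - i - 1 = (0 : Int) := by omega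
      rw [harg, pvAddFirst_zero]
      have hlist : pvAddFirst (i - prev - 1)
          (((pvSp ('.' :: t)).map (fun l => (l.length : Int))).dropLast)
          = (i - prev - 1 + 0) :: (((pvSp t).map (fun l => (l.length : Int))).dropLast) := by
        simp [pvSp, hsp, pvAddFirst]
      simp only [Prod.mk.injEq]
      refine ⟨?_, by trivial, ?_⟩
      · rw [hlist, List.foldl_cons, add_zero]
      · simp only [pvDots, if_pos]
        omega
    · have hstep : pvAltStep (m, prev, d) (i, c) = (m, prev, d) := by
        simp [pvAltStep, hc]
      rw [hstep]
      obtain ⟨p', hp⟩ := ih (i + 1) prev m d hd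
      refine ⟨p', ?_⟩
      rw [hp]
      have hsp' : pvSp (c :: t) = (c :: l) :: ls := by
        simp [pvSp, hc, hsp]
      have hlist : pvAddFirst (i + 1 - prev - 1)
          (((pvSp t).map (fun l => (l.length : Int))).dropLast)
          = pvAddFirst (i - prev - 1)
          (((pvSp (c :: t)).map (fun l => (l.length : Int))).dropLast) := by
        rw [hsp', hsp]
        cases ls with
        | nil => simp [pvAddFirst]
        | cons y ys =>
          simp only [List.map_cons, List.dropLast_cons₂, pvAddFirst, List.length_cons]
          congr 1
          push_cast
          ring
      simp only [Prod.mk.injEq]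
      refine ⟨by rw [hlist], by trivial, ?_⟩
      simp [pvDots, hc]

theorem pv_fold_zero (cs : List Char) :
    ∀ (i prev : Int),
    ∃ p', (PySem.List.enumerate cs i).foldl pvAltStep (0, prev, 0) =
      ((if pvDots cs = 0 then 0 else
          List.foldl max 0 (((pvSp cs).tail.map (fun l => (l.length : Int))).dropLast)),
       p', (pvDots cs : Int)) := by
  induction cs with
  | nil =>
    intro i prev
    exact ⟨prev, by simp [PySem.List.enumerate, pvDots]⟩
  | cons c t ih =>
    intro i prev
    rw [PySem.List.enumerate_cons, List.foldl_cons]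
    by_cases hc : c = '.'
    · subst hc
      have hstep : pvAltStep (0, prev, 0) (i, '.') = (0, i, 1) := by
        simp [pvAltStep]
      rw [hstep]
      obtain ⟨p', hp⟩ := pv_fold_pos t (i + 1) i 0 1 (by omega)
      refine ⟨p', ?_⟩
      rw [hp]
      have harg : i + 1 - i - 1 = (0 : Int) := by omega
      rw [harg, pvAddFirst_zero]
      simp only [Prod.mk.injEq]
      refine ⟨?_, by trivial, ?_⟩
      · rw [if_neg (by simp [pvDots])]
        simp [pvSp]
      · simp only [pvDots, if_pos]
        omega
    · have hstep : pvAltStep (0, prev, 0) (i, c) = (0, prev, 0) := by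
        simp [pvAltStep, hc]
      rw [hstep]
      obtain ⟨p', hp⟩ := ih (i + 1) prev
      refine ⟨p', ?_⟩
      rw [hp]
      obtain ⟨l, ls, hsp⟩ : ∃ l ls, pvSp t = l :: ls := by
        cases hx : pvSp t with
        | nil => exact absurd hx (pvSp_ne_nil t)
        | cons a b => exact ⟨a, b, rfl⟩
      have hsp' : pvSp (c :: t) = (c :: l) :: ls := by
        simp [pvSp, hc, hsp]
      have hd : pvDots (c :: t) = pvDots t := by simp [pvDots, hc]
      rw [hd, hsp', hsp]
      simp [List.tail_cons]

theorem pv_slice (xs : List (List Char)) :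
    PySem.List.slice xs (some 1) (some (-1)) = xs.tail.dropLast := by
  cases xs with
  | nil => simp [PySem.List.slice]
  | cons x t =>
    simp [PySem.List.slice]
    exact List.dropLast_eq_take.symm

-- ===== VERDICT (by name: the statement is the Claim_ definition above) =====
theorem find_maximum_gap_between_dots_spec : Claim_equal_find_maximum_gap_between_dots := by
  intro name _
  unfold Spec_find_maximum_gap_between_dots
  unfold find_maximum_gap_between_dots find_maximum_gap_between_dots_alt
  obtain ⟨p', hfold⟩ := pv_fold_zero name.toList 0 (-1)
  rw [hfold, pv_splitOn_eq]
  simp only [PySem.List.len_eq, pvSp_length]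
  by_cases hD : pvDots name.toList ≤ 1
  · have hA : ((pvDots name.toList + 1 : Nat) : Int) ≤ 2 := by push_cast; omega
    rw [if_pos hA, if_neg (by push_cast; omega)]
  · have hA : ¬ ((pvDots name.toList + 1 : Nat) : Int) ≤ 2 := by push_cast; omega
    rw [if_neg hA, if_pos (by push_cast; omega), if_neg (by omega)]
    rw [pv_slice]
    have hmap : ((pvSp name.toList).tail.map (fun l => (l.length : Int))).dropLast
        = ((pvSp name.toList).tail.dropLast).map (fun l => (l.length : Int)) := by
      exact (List.map_dropLast).symm
    rw [hmap]
    have hlen : (pvSp name.toList).tail.dropLast.length = pvDots name.toList - 1 := by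
      have := pvSp_length name.toList
      simp [List.length_dropLast, List.length_tail, this]
    cases hmid : (pvSp name.toList).tail.dropLast with
    | nil => rw [hmid] at hlen; simp at hlen; omega
    | cons y ys =>
      have hlenmap : PySem.Chars.len = fun (l : List Char) => (l.length : Int) := by
        funext l; exact PySem.Chars.len_eq l
      rw [hlenmap]
      simp only [List.map_cons, List.foldl_cons]
      rw [PySem.List.max?_id_cons]
      simp only [Option.getD_some]
      rw [max_eq_right (by positivity : (0 : Int) ≤ (y.length : Int))]
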